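-- pv_equiv track=rewrite | github.com/MohammedReshid1/spring-of-knowledge-hub | backend/app/routers/attendance.py | _calculate_longest_absence_streak
-- ===== SOURCE A (Python) =====
-- from typing import List, Any, Optional, Dict
--
-- def _calculate_longest_absence_streak(records: List[Dict]) -> int:
--     """Calculate longest absence streak in the period"""
--     if not records:
--         return 0
--
--     sorted_records = sorted(records, key=lambda x: x["attendance_date"])
--
--     max_streak = 0
--     current_streak = 0
--
--     for record in sorted_records:
--         if record["status"] == "absent":
--             current_streak += 1
--             max_streak = max(max_streak, current_streak)
--         else:
--             current_streak = 0
--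
--     return max_streak
-- ===== SOURCE B (Python) =====
-- def _calculate_longest_absence_streak(records):
--     """Encode the date-ordered statuses as a string of 'a'/'p' marks, split that
--     string on the present marker, and return the longest all-absent segment."""
--     ordered = sorted(records, key=lambda x: x["attendance_date"])
--     marks = "".join("a" if r["status"] == "absent" else "p" for r in ordered)
--     return max(len(seg) for seg in marks.split("p"))
-- ===== Notes on version B (the rewrite author's own statement) =====
-- stated objective: alternative
-- what changed: Instead of scanning with a running current-streak counter and inline running max, B encodes the date-sorted statuses as a string of 'a'/'p' marks, splits that string on the present marker 'p', and takes the maximum segment length; Pre_ excludes only inputs where A raises KeyError (a record missing 'attendance_date' or 'status').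
import Mathlib
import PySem

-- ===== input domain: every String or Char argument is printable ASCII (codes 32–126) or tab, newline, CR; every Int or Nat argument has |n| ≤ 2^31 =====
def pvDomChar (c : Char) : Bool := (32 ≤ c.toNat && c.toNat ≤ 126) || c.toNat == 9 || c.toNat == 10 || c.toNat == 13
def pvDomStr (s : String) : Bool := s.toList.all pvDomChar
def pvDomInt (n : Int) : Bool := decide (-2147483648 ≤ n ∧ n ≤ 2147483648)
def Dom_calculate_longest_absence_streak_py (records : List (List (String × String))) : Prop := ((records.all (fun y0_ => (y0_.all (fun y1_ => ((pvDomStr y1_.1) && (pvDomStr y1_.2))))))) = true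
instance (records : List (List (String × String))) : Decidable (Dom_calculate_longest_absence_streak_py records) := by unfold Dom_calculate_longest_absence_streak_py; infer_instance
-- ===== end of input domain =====

-- B encodes the date-sorted statuses as a string of 'a'/'p' marks, splits it on the
-- present marker 'p' and takes the maximum segment length, instead of A's inline
-- running-streak/running-max counters. Pre_ excludes only inputs where Python A
-- raises KeyError (a record missing "attendance_date" or "status").

-- first-match lookup in the association list representing a Python dict (r[k]; none = KeyError)
def pyLookup (r : List (String × String)) (k : String) : Option String :=
  (r.find? (fun p => p.1 == k)).map (·.2)

-- ===== PORT A =====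
def calculate_longest_absence_streak_py (records : List (List (String × String))) : Int :=
  if records = [] then 0
  else
    let sorted_records := PySem.List.sorted records (fun x => (pyLookup x "attendance_date").getD "")
    let st := sorted_records.foldl
      (fun (st : Int × Int) record =>
        if (pyLookup record "status").getD "" = "absent" then
          (max st.1 (st.2 + 1), st.2 + 1)
        else (st.1, 0)) (0, 0)
    st.1

-- ===== PORT B =====
def calculate_longest_absence_streak_py_alt (records : List (List (String × String))) : Int :=
  let ordered := PySem.List.sorted records (fun x => (pyLookup x "attendance_date").getD "")
  -- "".join("a" if … else "p" for r in ordered): the marks string as its char list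
  let marks : List Char := ordered.flatMap
    (fun r => if (pyLookup r "status").getD "" = "absent" then ['a'] else ['p'])
  -- marks.split("p"): for the one-char separator Python's str.split is exactly
  -- List.splitOn 'p' (including "".split("p") = [""]), so the result is never empty
  let segs := marks.splitOn 'p'
  -- max(len(seg) for seg in segs)
  (PySem.List.max? (segs.map (fun seg => (seg.length : Int))) (fun y => y)).getD 0

-- ===== PRECONDITION & SPEC =====
-- Pre_ excludes exactly the inputs on which Python A raises KeyError: a record without
-- an "attendance_date" key (raised inside sorted's key) or without a "status" key.
def Pre_calculate_longest_absence_streak_py (records : List (List (String × String))) : Prop :=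
  (records.all (fun r => r.any (fun p => p.1 == "attendance_date") && r.any (fun p => p.1 == "status"))) = true
instance (records : List (List (String × String))) : Decidable (Pre_calculate_longest_absence_streak_py records) := by unfold Pre_calculate_longest_absence_streak_py; infer_instance

def pvWitness_calculate_longest_absence_streak_py : (List (List (String × String))) :=
  [[("attendance_date", "2024-01-02"), ("status", "absent")],
   [("attendance_date", "2024-01-01"), ("status", "present")]]

def Spec_calculate_longest_absence_streak_py (records : List (List (String × String))) (out : Int) : Prop := out = calculate_longest_absence_streak_py_alt records
instance (records : List (List (String × String))) (out : Int) : Decidable (Spec_calculate_longest_absence_streak_py records out) := by unfold Spec_calculate_longest_absence_streak_py; infer_instance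

-- ===== CLAIM (what is proved, stated in full; the proofs are below) =====
def Claim_equal_calculate_longest_absence_streak_py : Prop := ∀ (records : List (List (String × String))), Dom_calculate_longest_absence_streak_py records → Pre_calculate_longest_absence_streak_py records → Spec_calculate_longest_absence_streak_py records (calculate_longest_absence_streak_py records)

-- ===== LEMMAS AND PROOFS =====

-- maximum of a nonempty Int list (the 0 for [] is never used)
def maxL : List Int → Int
  | [] => 0
  | x :: t => t.foldl max x

-- segment lengths of the 'a'/'p' encoding of l under predicate p
def lensP {α : Type} (p : α → Prop) [DecidablePred p] (l : List α) : List Int :=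
  ((l.map (fun a => if p a then 'a' else 'p')).splitOn 'p').map (fun s => (s.length : Int))

-- add c to the head entry of a list
def addHead (c : Int) : List Int → List Int
  | [] => []
  | x :: t => (c + x) :: t

theorem foldl_max_init (t : List Int) : ∀ a b : Int, t.foldl max (max a b) = max a (t.foldl max b) := by
  induction t with
  | nil => intro a b; rfl
  | cons x s ih =>
    intro a b
    simp only [List.foldl_cons, max_assoc, ih]

theorem maxL_cons (c : Int) (L : List Int) (h : L ≠ []) : maxL (c :: L) = max c (maxL L) := by
  obtain ⟨x, t, rfl⟩ := List.exists_cons_of_ne_nil h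
  simp only [maxL, List.foldl_cons, foldl_max_init]

theorem head_le_maxL (x : Int) (t : List Int) : x ≤ maxL (x :: t) := by
  induction t generalizing x with
  | nil => simp [maxL]
  | cons y s ih =>
    have := ih (max x y)
    simp only [maxL, List.foldl_cons] at this ⊢
    exact le_trans (le_max_left x y) this

theorem splitOn_map_ne_nil {α : Type} (p : α → Prop) [DecidablePred p] (l : List α) :
    (l.map (fun a => if p a then 'a' else 'p')).splitOn 'p' ≠ [] := by
  unfold List.splitOn
  exact List.splitOnP_ne_nil _ _

theorem lensP_ne_nil {α : Type} (p : α → Prop) [DecidablePred p] (l : List α) :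
    lensP p l ≠ [] := by
  unfold lensP
  simpa using splitOn_map_ne_nil p l

theorem lensP_nil {α : Type} (p : α → Prop) [DecidablePred p] : lensP p ([] : List α) = [0] := by
  simp [lensP, List.splitOn, List.splitOnP_nil]

theorem lensP_cons_pos {α : Type} (p : α → Prop) [DecidablePred p] (a : α) (l : List α) (h : p a) :
    lensP p (a :: l) = addHead 1 (lensP p l) := by
  obtain ⟨s, t, hst⟩ := List.exists_cons_of_ne_nil (splitOn_map_ne_nil p l)
  unfold lensP
  rw [List.map_cons, if_pos h]
  unfold List.splitOn at hst ⊢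
  rw [List.splitOnP_cons, if_neg (by decide : ¬(('a' == 'p') = true)), hst]
  simp only [List.modifyHead, List.map_cons, List.length_cons, addHead]
  congr 1
  push_cast
  ring

theorem lensP_cons_neg {α : Type} (p : α → Prop) [DecidablePred p] (a : α) (l : List α) (h : ¬ p a) :
    lensP p (a :: l) = 0 :: lensP p l := by
  unfold lensP List.splitOn
  rw [List.map_cons, if_neg h, List.splitOnP_cons]
  simp

-- head of lensP is a nonnegative length
theorem lensP_head_nonneg {α : Type} (p : α → Prop) [DecidablePred p] (l : List α)
    (x : Int) (t : List Int) (h : lensP p l = x :: t) : 0 ≤ x := by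
  obtain ⟨s, ts, hst⟩ := List.exists_cons_of_ne_nil (splitOn_map_ne_nil p l)
  unfold lensP at h
  rw [hst] at h
  simp only [List.map_cons, List.cons.injEq] at h
  rw [← h.1]
  positivity

-- loop invariant: A's fold from (ms, cs) computes max of ms and the segment maxima
-- with the open head segment extended by cs
theorem streak_inv {α : Type} (p : α → Prop) [DecidablePred p] :
    ∀ (l : List α) (ms cs : Int), 0 ≤ cs → cs ≤ ms →
      (l.foldl (fun (st : Int × Int) a =>
          if p a then (max st.1 (st.2 + 1), st.2 + 1) else (st.1, 0)) (ms, cs)).1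
        = max ms (maxL (addHead cs (lensP p l))) := by
  intro l
  induction l with
  | nil =>
    intro ms cs h0 hle
    simp only [List.foldl_nil, lensP_nil, addHead, maxL, List.foldl_nil, add_zero]
    omega
  | cons a t ih =>
    intro ms cs h0 hle
    by_cases hp : p a
    · simp only [List.foldl_cons, if_pos hp]
      rw [ih (max ms (cs + 1)) (cs + 1) (by omega) (by omega)]
      rw [lensP_cons_pos p a t hp]
      obtain ⟨x, ts, hx⟩ := List.exists_cons_of_ne_nil (lensP_ne_nil p t)
      have hx0 : 0 ≤ x := lensP_head_nonneg p t x ts hx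
      rw [hx]
      have harith : cs + 1 + x = cs + (1 + x) := by ring
      simp only [addHead, harith]
      have hhead := head_le_maxL (cs + (1 + x)) ts
      omega
    · simp only [List.foldl_cons, if_neg hp]
      rw [ih ms 0 (by omega) (by omega)]
      rw [lensP_cons_neg p a t hp]
      obtain ⟨x, ts, hx⟩ := List.exists_cons_of_ne_nil (lensP_ne_nil p t)
      have hx0 : 0 ≤ x := lensP_head_nonneg p t x ts hx
      rw [hx]
      simp only [addHead, zero_add]
      rw [maxL_cons (cs + 0) (x :: ts) (by simp)]
      have h1 : max ms (max (cs + 0) (maxL (x :: ts))) = max (max ms (cs + 0)) (maxL (x :: ts)) :=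
        (max_assoc ms (cs + 0) (maxL (x :: ts))).symm
      rw [h1, max_eq_left (by omega : cs + 0 ≤ ms)]

-- the marks list B builds is the map of the status predicate over ordered
theorem flatMap_marks (l : List (List (String × String))) :
    (l.flatMap (fun r => if (pyLookup r "status").getD "" = "absent" then (['a'] : List Char) else ['p']))
      = l.map (fun r => if (pyLookup r "status").getD "" = "absent" then 'a' else 'p') := by
  induction l with
  | nil => rfl
  | cons a t ih => by_cases h : (pyLookup a "status").getD "" = "absent" <;>
      simp [List.flatMap_cons, ih, h]

-- ===== VERDICT (by name: the statement is the Claim_ definition above) =====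
theorem calculate_longest_absence_streak_py_spec : Claim_equal_calculate_longest_absence_streak_py := by
  intro records _ _
  unfold Spec_calculate_longest_absence_streak_py
  unfold calculate_longest_absence_streak_py calculate_longest_absence_streak_py_alt
  by_cases hrec : records = []
  · subst hrec; decide
  · simp only [hrec, if_false]
    set l := PySem.List.sorted records (fun x => (pyLookup x "attendance_date").getD "") with hl
    rw [flatMap_marks l]
    obtain ⟨x, ts, hx⟩ := List.exists_cons_of_ne_nil
      (lensP_ne_nil (fun r => (pyLookup r "status").getD "" = "absent") l)
    have hx0 : 0 ≤ x := lensP_head_nonneg _ l x ts hx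
    have hinv := streak_inv (fun r => (pyLookup r "status").getD "" = "absent") l 0 0
      (by omega) (by omega)
    rw [hx] at hinv
    have hx' : ((l.map (fun r => if (pyLookup r "status").getD "" = "absent" then 'a' else 'p')).splitOn
        'p').map (fun s => (s.length : Int)) = x :: ts := hx
    rw [hinv, hx', PySem.List.max?_id_cons]
    have hhead := head_le_maxL x ts
    simp only [addHead, zero_add, Option.getD_some]
    have hm : ts.foldl max x = maxL (x :: ts) := rfl
    rw [hm]
    omega
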